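-- pv_equiv track=rewrite | github.com/jinyr1128/Coding_test | 백준/Gold/2342. Dance Dance Revolution/Dance Dance Revolution.py | solve
-- ===== SOURCE A (Python) =====
-- def calc_cost(from_pos, to_pos):
--     if from_pos == 0:
--         return 2  # 중앙에서 다른 곳으로 이동
--     if from_pos == to_pos:
--         return 1  # 같은 곳을 다시 밟음
--     if (from_pos == 1 and to_pos == 3) or (from_pos == 2 and to_pos == 4) or \
--        (from_pos == 3 and to_pos == 1) or (from_pos == 4 and to_pos == 2):
--         return 4  # 반대편으로 이동
--     return 3  # 인접한 곳으로 이동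
--
-- def solve(steps):
--     inf = float('inf')
--     # dp[left][right]는 왼쪽 발이 left에, 오른쪽 발이 right에 있을 때 최소 힘 사용량
--     dp = {}
--     dp[(0, 0)] = 0  # 초기 상태
--
--     for step in steps:
--         new_dp = {}
--         for (left, right), cost in dp.items():
--             # 왼쪽 발을 step으로 이동
--             if step != right:  # 두 발이 같은 지점에 있을 수 없음
--                 next_cost = cost + calc_cost(left, step)
--                 if (step, right) not in new_dp:
--                     new_dp[(step, right)] = next_cost
--                 else:
--                     new_dp[(step, right)] = min(new_dp[(step, right)], next_cost)
--
--             # 오른쪽 발을 step으로 이동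
--             if step != left:
--                 next_cost = cost + calc_cost(right, step)
--                 if (left, step) not in new_dp:
--                     new_dp[(left, step)] = next_cost
--                 else:
--                     new_dp[(left, step)] = min(new_dp[(left, step)], next_cost)
--
--         dp = new_dp
--
--     # 최소 힘 찾기
--     return min(dp.values())
-- ===== SOURCE B (Python) =====
-- def calc_cost(from_pos, to_pos):
--     if from_pos == 0:
--         return 2
--     if from_pos == to_pos:
--         return 1
--     if (from_pos == 1 and to_pos == 3) or (from_pos == 2 and to_pos == 4) or \
--        (from_pos == 3 and to_pos == 1) or (from_pos == 4 and to_pos == 2):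
--         return 4
--     return 3
--
--
-- def solve(steps):
--     # 1-D DP: after each step one foot stands on the current step position,
--     # so only the position of the OTHER foot needs to be a dp key.
--     cur = 0            # position of the foot standing on the last step (center at start)
--     dp = {0: 0}        # other-foot position -> minimal energy
--     for s in steps:
--         nd = {}
--         for other, c in dp.items():
--             if s != other:
--                 # move the foot standing on `cur` onto s; other foot stays
--                 v = c + calc_cost(cur, s)
--                 if other not in nd or v < nd[other]:
--                     nd[other] = v
--             if s != cur:
--                 # move the foot standing on `other` onto s; `cur` becomes the other foot
--                 v = c + calc_cost(other, s)
--                 if cur not in nd or v < nd[cur]: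
--                     nd[cur] = v
--         dp = nd
--         cur = s
--     return min(dp.values())
-- ===== Notes on version B (the rewrite author's own statement) =====
-- stated objective: faster
-- what changed: Collapses the 2-D dp over ordered (left,right) foot pairs to a 1-D dp keyed only by the foot NOT on the current step (the current step position is tracked in a scalar), halving the state space and eliminating tuple keys.
-- outside the precondition, e.g. on solve([0, 0]): A raises ValueError, B raises ValueError
import Mathlib
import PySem

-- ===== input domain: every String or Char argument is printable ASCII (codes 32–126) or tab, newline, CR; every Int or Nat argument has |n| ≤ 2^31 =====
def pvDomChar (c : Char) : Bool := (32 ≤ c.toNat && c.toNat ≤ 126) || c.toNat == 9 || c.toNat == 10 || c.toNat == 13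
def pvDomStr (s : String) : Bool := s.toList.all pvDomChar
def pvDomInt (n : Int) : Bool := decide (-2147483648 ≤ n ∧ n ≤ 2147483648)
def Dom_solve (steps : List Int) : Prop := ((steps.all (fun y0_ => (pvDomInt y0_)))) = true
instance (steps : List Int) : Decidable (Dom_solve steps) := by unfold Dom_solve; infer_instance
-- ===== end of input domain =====

-- B collapses A's 2-D dp over (left,right) foot pairs to a 1-D dp keyed by the foot not on
-- the current step (objective: faster by a constant factor — half the dp states, int keys).

-- ===== PORT A =====
-- shared by both ports: Source B's calc_cost is textually identical to Source A's
def calcCost (from_pos to_pos : Int) : Int :=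
  if from_pos = 0 then 2
  else if from_pos = to_pos then 1
  else if (from_pos = 1 ∧ to_pos = 3) ∨ (from_pos = 2 ∧ to_pos = 4) ∨
          (from_pos = 3 ∧ to_pos = 1) ∨ (from_pos = 4 ∧ to_pos = 2) then 4
  else 3

-- body of A's inner loop over dp.items()
def updA (step : Int) (nd : PySem.Dict (Int × Int) Int) (it : (Int × Int) × Int) :
    PySem.Dict (Int × Int) Int :=
  let l := it.1.1
  let r := it.1.2
  let c := it.2
  let nd1 :=
    if step ≠ r then
      let nc := c + calcCost l step
      if nd.contains (step, r) = false then nd.insert (step, r) nc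
      else nd.insert (step, r) (min (nd.getD (step, r) 0) nc)
    else nd
  if step ≠ l then
    let nc := c + calcCost r step
    if nd1.contains (l, step) = false then nd1.insert (l, step) nc
    else nd1.insert (l, step) (min (nd1.getD (l, step) 0) nc)
  else nd1

def solve (steps : List Int) : Int :=
  let dp0 : PySem.Dict (Int × Int) Int := PySem.Dict.empty.insert (0, 0) 0
  let dp := steps.foldl (fun dp step => dp.items.foldl (updA step) PySem.Dict.empty) dp0
  match PySem.List.min? dp.values (fun v => v) with
  | some m => m
  | none => 0   -- Python raises ValueError (min of empty dict); excluded by Pre_solve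

-- ===== PORT B =====
-- body of B's inner loop over dp.items(); cur = foot position on the previous step
def updB (cur s : Int) (nd : PySem.Dict Int Int) (it : Int × Int) : PySem.Dict Int Int :=
  let other := it.1
  let c := it.2
  let nd1 :=
    if s ≠ other then
      let v := c + calcCost cur s
      if nd.contains other = false ∨ v < nd.getD other 0 then nd.insert other v else nd
    else nd
  if s ≠ cur then
    let v := c + calcCost other s
    if nd1.contains cur = false ∨ v < nd1.getD cur 0 then nd1.insert cur v else nd1
  else nd1

def solve_alt (steps : List Int) : Int :=
  let fin := steps.foldl
    (fun (p : Int × PySem.Dict Int Int) s => (s, p.2.items.foldl (updB p.1 s) PySem.Dict.empty))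
    (0, PySem.Dict.empty.insert 0 0)
  match PySem.List.min? fin.2.values (fun v => v) with
  | some m => m
  | none => 0   -- Python raises ValueError (min of empty dict); excluded by Pre_solve

-- ===== PRECONDITION & SPEC =====
-- A (and B) raise ValueError (min of an empty dict) exactly when the first step is 0:
-- from the initial state (0,0) no foot may move onto a step equal to the other foot's position.
-- (The two ports happen to agree even there — both return the dead-code 0 — so the proof
-- below does not need the hypothesis; Pre_ only excludes the Python-level exception.)
def Pre_solve (steps : List Int) : Prop := steps.head? ≠ some 0
instance (steps : List Int) : Decidable (Pre_solve steps) := by unfold Pre_solve; infer_instance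
def pvWitness_solve : List Int := ([1, 2, 3] : List Int)

def Spec_solve (steps : List Int) (out : Int) : Prop := out = solve_alt steps
instance (steps : List Int) (out : Int) : Decidable (Spec_solve steps out) := by unfold Spec_solve; infer_instance

-- ===== CLAIM (what is proved, stated in full; the proofs are below) =====
def Claim_equal_solve : Prop := ∀ (steps : List Int), Dom_solve steps → Pre_solve steps → Spec_solve steps (solve steps)

-- ===== LEMMAS AND PROOFS =====

-- running minimum on Option Int: how both inner loops update one key
def optMin : Option Int → Int → Option Int
  | none, v => some v
  | some w, v => some (min w v)

-- values contributed by one dp item of A to key k of the new dict (in loop-body order)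
def contribA (s : Int) (it : (Int × Int) × Int) (k : Int × Int) : List Int :=
  (if s ≠ it.1.2 ∧ k = (s, it.1.2) then [it.2 + calcCost it.1.1 s] else []) ++
  (if s ≠ it.1.1 ∧ k = (it.1.1, s) then [it.2 + calcCost it.1.2 s] else [])

-- values contributed by one dp item of B to key k of the new dict
def contribB (cur s : Int) (it : Int × Int) (k : Int) : List Int :=
  (if s ≠ it.1 ∧ k = it.1 then [it.2 + calcCost cur s] else []) ++
  (if s ≠ cur ∧ k = cur then [it.2 + calcCost it.1 s] else [])

-- the invariant tying A's pair-keyed dict to B's one-foot dict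
def InvAB (cur : Int) (dA : PySem.Dict (Int × Int) Int) (dB : PySem.Dict Int Int) : Prop :=
  ∀ l r : Int, dA.get? (l, r) =
    (if l = cur then dB.get? r else if r = cur then dB.get? l else none)

lemma get?_minInsA {κ : Type} [BEq κ] [LawfulBEq κ] [DecidableEq κ]
    (nd : PySem.Dict κ Int) (k0 k : κ) (nc : Int) :
    (if nd.contains k0 = false then nd.insert k0 nc
     else nd.insert k0 (min (nd.getD k0 0) nc)).get? k
      = if k = k0 then optMin (nd.get? k0) nc else nd.get? k := by
  by_cases h : nd.contains k0 = false
  · have hn : nd.get? k0 = none := (PySem.Dict.get?_eq_none_iff_contains nd k0).mpr h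
    simp [h, PySem.Dict.get?_insert, hn, optMin]
  · obtain ⟨w, hw⟩ : ∃ w, nd.get? k0 = some w := by
      have := PySem.Dict.contains_eq_isSome_get? nd k0
      rcases hg : nd.get? k0 with _ | w
      · rw [hg] at this; simp [this] at h
      · exact ⟨w, rfl⟩
    simp [h, PySem.Dict.get?_insert, hw, PySem.Dict.getD_eq_get?_getD, optMin]

lemma get?_minInsB {κ : Type} [BEq κ] [LawfulBEq κ] [DecidableEq κ]
    (nd : PySem.Dict κ Int) (k0 k : κ) (nc : Int) :
    (if nd.contains k0 = false ∨ nc < nd.getD k0 0 then nd.insert k0 nc else nd).get? k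
      = if k = k0 then optMin (nd.get? k0) nc else nd.get? k := by
  by_cases h : nd.contains k0 = false
  · have hn : nd.get? k0 = none := (PySem.Dict.get?_eq_none_iff_contains nd k0).mpr h
    simp [h, PySem.Dict.get?_insert, hn, optMin]
  · obtain ⟨w, hw⟩ : ∃ w, nd.get? k0 = some w := by
      have := PySem.Dict.contains_eq_isSome_get? nd k0
      rcases hg : nd.get? k0 with _ | w
      · rw [hg] at this; simp [this] at h
      · exact ⟨w, rfl⟩
    have hD : nd.getD k0 0 = w := by rw [PySem.Dict.getD_eq_get?_getD, hw]; rfl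
    by_cases hlt : nc < w
    · have hm : min w nc = nc := min_eq_right (le_of_lt hlt)
      simp [h, hD, hlt, PySem.Dict.get?_insert, hw, optMin, hm]
    · have hm : min w nc = w := min_eq_left (le_of_not_gt hlt)
      simp only [hD, hlt, or_false, h]
      rw [if_neg (by simp)]
      by_cases hk : k = k0
      · subst hk; rw [hw]; simp [optMin, hm]
      · rw [if_neg hk]

lemma get?_updA (s : Int) (nd : PySem.Dict (Int × Int) Int) (it : (Int × Int) × Int)
    (k : Int × Int) :
    (updA s nd it).get? k = (contribA s it k).foldl optMin (nd.get? k) := by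
  rcases it with ⟨⟨l, r⟩, c⟩
  simp only [updA, contribA]
  by_cases h1 : s ≠ r <;> by_cases h2 : s ≠ l
  · rw [if_pos h1, if_pos h2]
    simp only [get?_minInsA]
    by_cases hk1 : k = (s, r)
    · subst hk1
      have hk2 : (s, r) ≠ (l, s) := fun h => h1 (congrArg Prod.snd h).symm
      simp [hk2, h1, h2, List.foldl, optMin]
    · by_cases hk2 : k = (l, s)
      · subst hk2; simp [hk1, h1, h2, List.foldl, optMin]
      · simp [hk1, hk2, h1, h2]
  · rw [if_pos h1, if_neg h2]
    simp only [get?_minInsA]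
    by_cases hk1 : k = (s, r)
    · subst hk1; simp [h1, h2, optMin]
    · simp [hk1, h2]
  · rw [if_neg h1, if_pos h2]  -- s = r branch
    simp only [get?_minInsA]
    by_cases hk2 : k = (l, s)
    · subst hk2; simp [h1, h2, optMin]
    · simp [hk2, h1, h2]
  · rw [if_neg h1, if_neg h2]; simp [h1, h2]

lemma get?_updB (cur s : Int) (nd : PySem.Dict Int Int) (it : Int × Int) (k : Int) :
    (updB cur s nd it).get? k = (contribB cur s it k).foldl optMin (nd.get? k) := by
  rcases it with ⟨o, c⟩
  simp only [updB, contribB]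
  by_cases h1 : s ≠ o <;> by_cases h2 : s ≠ cur
  · rw [if_pos h1, if_pos h2]
    simp only [get?_minInsB]
    by_cases hk1 : k = o
    · subst hk1
      by_cases hk2 : k = cur
      · subst hk2; simp [h1, optMin]
      · simp [hk2, h1, optMin]
    · by_cases hk2 : k = cur
      · subst hk2; simp [hk1, h1, h2, optMin]
      · simp [hk1, hk2, h1, h2]
  · rw [if_pos h1, if_neg h2]
    simp only [get?_minInsB]
    by_cases hk1 : k = o
    · subst hk1; simp [h1, h2, optMin]
    · simp [hk1, h1, h2]
  · rw [if_neg h1, if_pos h2]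
    simp only [get?_minInsB]
    by_cases hk2 : k = cur
    · subst hk2; simp [h1, h2, optMin]
    · simp [hk2, h1, h2]
  · rw [if_neg h1, if_neg h2]; simp [h1, h2]

lemma get?_foldA (s : Int) :
    ∀ (items : List ((Int × Int) × Int)) (nd : PySem.Dict (Int × Int) Int) (k : Int × Int),
    (items.foldl (updA s) nd).get? k
      = (items.flatMap (fun it => contribA s it k)).foldl optMin (nd.get? k) := by
  intro items
  induction items with
  | nil => intro nd k; rfl
  | cons it rest ih =>
    intro nd k
    rw [List.foldl_cons, List.flatMap_cons, List.foldl_append, ih, get?_updA]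

lemma get?_foldB (cur s : Int) :
    ∀ (items : List (Int × Int)) (nd : PySem.Dict Int Int) (k : Int),
    (items.foldl (updB cur s) nd).get? k
      = (items.flatMap (fun it => contribB cur s it k)).foldl optMin (nd.get? k) := by
  intro items
  induction items with
  | nil => intro nd k; rfl
  | cons it rest ih =>
    intro nd k
    rw [List.foldl_cons, List.flatMap_cons, List.foldl_append, ih, get?_updB]

lemma nodup_updA (s : Int) (nd : PySem.Dict (Int × Int) Int) (it : (Int × Int) × Int)
    (h : nd.keys.Nodup) : (updA s nd it).keys.Nodup := by
  rcases it with ⟨⟨l, r⟩, c⟩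
  simp only [updA]
  split_ifs <;> first
    | exact PySem.Dict.nodup_keys_insert _ _ _ (PySem.Dict.nodup_keys_insert _ _ _ h)
    | exact PySem.Dict.nodup_keys_insert _ _ _ h
    | exact h

lemma nodup_updB (cur s : Int) (nd : PySem.Dict Int Int) (it : Int × Int)
    (h : nd.keys.Nodup) : (updB cur s nd it).keys.Nodup := by
  rcases it with ⟨o, c⟩
  simp only [updB]
  split_ifs <;> first
    | exact PySem.Dict.nodup_keys_insert _ _ _ (PySem.Dict.nodup_keys_insert _ _ _ h)
    | exact PySem.Dict.nodup_keys_insert _ _ _ h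
    | exact h

lemma nodup_foldA (s : Int) :
    ∀ (items : List ((Int × Int) × Int)) (nd : PySem.Dict (Int × Int) Int),
    nd.keys.Nodup → ((items.foldl (updA s) nd)).keys.Nodup := by
  intro items
  induction items with
  | nil => intro nd h; exact h
  | cons it rest ih => intro nd h; exact ih _ (nodup_updA s nd it h)

lemma nodup_foldB (cur s : Int) :
    ∀ (items : List (Int × Int)) (nd : PySem.Dict Int Int),
    nd.keys.Nodup → ((items.foldl (updB cur s) nd)).keys.Nodup := by
  intro items
  induction items with
  | nil => intro nd h; exact h
  | cons it rest ih => intro nd h; exact ih _ (nodup_updB cur s nd it h)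

lemma optMin_ne_none (a : Option Int) (v : Int) : optMin a v ≠ none := by
  cases a <;> simp [optMin]

lemma optMin_foldl_eq_none :
    ∀ (l : List Int) (acc : Option Int), l.foldl optMin acc = none ↔ l = [] ∧ acc = none := by
  intro l
  induction l with
  | nil => intro acc; simp
  | cons x t ih =>
    intro acc
    rw [List.foldl_cons, ih]
    simp [optMin_ne_none]

lemma optMin_foldl_some_spec :
    ∀ (l : List Int) (acc : Option Int) (m : Int), l.foldl optMin acc = some m →
      (m ∈ l ∨ acc = some m) ∧ (∀ x ∈ l, m ≤ x) ∧ (∀ a, acc = some a → m ≤ a) := by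
  intro l
  induction l with
  | nil =>
    intro acc m h
    simp only [List.foldl_nil] at h
    refine ⟨Or.inr h, by simp, ?_⟩
    intro a ha
    rw [h] at ha
    exact le_of_eq (Option.some_inj.mp ha)
  | cons x t ih =>
    intro acc m h
    rw [List.foldl_cons] at h
    obtain ⟨h1, h2, h3⟩ := ih (optMin acc x) m h
    rcases hacc : acc with _ | a
    · have hx : optMin acc x = some x := by rw [hacc]; rfl
      have hmx : m ≤ x := h3 x (hacc ▸ hx)
      refine ⟨Or.inl ?_, ?_, ?_⟩
      · rcases h1 with h1 | h1
        · exact List.mem_cons_of_mem _ h1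
        · rw [hx] at h1; exact (Option.some_inj.mp h1) ▸ List.mem_cons_self
      · intro y hy
        rcases List.mem_cons.mp hy with rfl | hy
        · exact hmx
        · exact h2 y hy
      · intro a ha; cases ha
    · have hx : optMin acc x = some (min a x) := by rw [hacc]; rfl
      have hmax : m ≤ min a x := h3 _ (hacc ▸ hx)
      refine ⟨?_, ?_, ?_⟩
      · rcases h1 with h1 | h1
        · exact Or.inl (List.mem_cons_of_mem _ h1)
        · rw [hx] at h1
          have hm : m = min a x := (Option.some_inj.mp h1).symm
          rcases le_total a x with hax | hax
          · exact Or.inr (by rw [hm, min_eq_left hax])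
          · exact Or.inl (by rw [hm, min_eq_right hax]; exact List.mem_cons_self)
      · intro y hy
        rcases List.mem_cons.mp hy with rfl | hy
        · exact le_trans hmax (min_le_right a y)
        · exact h2 y hy
      · intro b hb
        have : b = a := (Option.some_inj.mp hb).symm
        exact this ▸ le_trans hmax (min_le_left a x)

lemma omin_congr (l1 l2 : List Int) (h : ∀ x, x ∈ l1 ↔ x ∈ l2) :
    l1.foldl optMin none = l2.foldl optMin none := by
  rcases hl1 : l1.foldl optMin none with _ | m1
  · have he1 : l1 = [] := ((optMin_foldl_eq_none l1 none).mp hl1).1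
    have he2 : l2 = [] := by
      cases hc : l2 with
      | nil => rfl
      | cons y t =>
        have : y ∈ l1 := (h y).mpr (by rw [hc]; exact List.mem_cons_self)
        rw [he1] at this; cases this
    rw [he2]; rfl
  · rcases hl2 : l2.foldl optMin none with _ | m2
    · have he2 : l2 = [] := ((optMin_foldl_eq_none l2 none).mp hl2).1
      obtain ⟨hm1, _, _⟩ := optMin_foldl_some_spec l1 none m1 hl1
      rcases hm1 with hm1 | hm1
      · have : m1 ∈ l2 := (h m1).mp hm1
        rw [he2] at this; cases this
      · cases hm1
    · obtain ⟨hm1, hmin1, _⟩ := optMin_foldl_some_spec l1 none m1 hl1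
      obtain ⟨hm2, hmin2, _⟩ := optMin_foldl_some_spec l2 none m2 hl2
      have hm1' : m1 ∈ l1 := by rcases hm1 with h' | h'; exact h'; cases h'
      have hm2' : m2 ∈ l2 := by rcases hm2 with h' | h'; exact h'; cases h'
      have h12 : m2 ≤ m1 := hmin2 m1 ((h m1).mp hm1')
      have h21 : m1 ≤ m2 := hmin1 m2 ((h m2).mpr hm2')
      rw [le_antisymm h21 h12]

lemma mem_contribA (s : Int) (it : (Int × Int) × Int) (k : Int × Int) (x : Int) :
    x ∈ contribA s it k ↔
      ((s ≠ it.1.2 ∧ k = (s, it.1.2) ∧ x = it.2 + calcCost it.1.1 s) ∨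
       (s ≠ it.1.1 ∧ k = (it.1.1, s) ∧ x = it.2 + calcCost it.1.2 s)) := by
  simp only [contribA, List.mem_append]
  constructor
  · rintro (hx | hx) <;> [left; right] <;>
      (split_ifs at hx with h
       · simp only [List.mem_singleton] at hx; exact ⟨h.1, h.2, hx⟩
       · cases hx)
  · rintro (⟨h1, h2, h3⟩ | ⟨h1, h2, h3⟩) <;> [left; right] <;>
      · rw [if_pos ⟨h1, h2⟩]; simp [h3]

lemma mem_contribB (cur s : Int) (it : Int × Int) (k : Int) (x : Int) :
    x ∈ contribB cur s it k ↔
      ((s ≠ it.1 ∧ k = it.1 ∧ x = it.2 + calcCost cur s) ∨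
       (s ≠ cur ∧ k = cur ∧ x = it.2 + calcCost it.1 s)) := by
  simp only [contribB, List.mem_append]
  constructor
  · rintro (hx | hx) <;> [left; right] <;>
      (split_ifs at hx with h
       · simp only [List.mem_singleton] at hx; exact ⟨h.1, h.2, hx⟩
       · cases hx)
  · rintro (⟨h1, h2, h3⟩ | ⟨h1, h2, h3⟩) <;> [left; right] <;>
      · rw [if_pos ⟨h1, h2⟩]; simp [h3]

lemma mem_flatA (s : Int) (dA : PySem.Dict (Int × Int) Int) (hA : dA.keys.Nodup)
    (k : Int × Int) (x : Int) :
    x ∈ dA.items.flatMap (fun it => contribA s it k) ↔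
      ∃ l r c, dA.get? (l, r) = some c ∧
        ((s ≠ r ∧ k = (s, r) ∧ x = c + calcCost l s) ∨
         (s ≠ l ∧ k = (l, s) ∧ x = c + calcCost r s)) := by
  rw [List.mem_flatMap]
  constructor
  · rintro ⟨it, hit, hx⟩
    rcases it with ⟨⟨l, r⟩, c⟩
    refine ⟨l, r, c, PySem.Dict.get?_of_mem_items dA hit hA, ?_⟩
    exact (mem_contribA s ⟨⟨l, r⟩, c⟩ k x).mp hx
  · rintro ⟨l, r, c, hget, hd⟩
    exact ⟨⟨⟨l, r⟩, c⟩, PySem.Dict.mem_items_of_get?_eq_some dA hget,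
      (mem_contribA s ⟨⟨l, r⟩, c⟩ k x).mpr hd⟩

lemma mem_flatB (cur s : Int) (dB : PySem.Dict Int Int) (hB : dB.keys.Nodup)
    (k : Int) (x : Int) :
    x ∈ dB.items.flatMap (fun it => contribB cur s it k) ↔
      ∃ o c, dB.get? o = some c ∧
        ((s ≠ o ∧ k = o ∧ x = c + calcCost cur s) ∨
         (s ≠ cur ∧ k = cur ∧ x = c + calcCost o s)) := by
  rw [List.mem_flatMap]
  constructor
  · rintro ⟨it, hit, hx⟩
    rcases it with ⟨o, c⟩
    refine ⟨o, c, PySem.Dict.get?_of_mem_items dB hit hB, ?_⟩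
    exact (mem_contribB cur s ⟨o, c⟩ k x).mp hx
  · rintro ⟨o, c, hget, hd⟩
    exact ⟨⟨o, c⟩, PySem.Dict.mem_items_of_get?_eq_some dB hget,
      (mem_contribB cur s ⟨o, c⟩ k x).mpr hd⟩

lemma step_inv (s cur : Int) (dA : PySem.Dict (Int × Int) Int) (dB : PySem.Dict Int Int)
    (hA : dA.keys.Nodup) (hB : dB.keys.Nodup) (hInv : InvAB cur dA dB) :
    InvAB s (dA.items.foldl (updA s) PySem.Dict.empty)
          (dB.items.foldl (updB cur s) PySem.Dict.empty) := by
  intro l r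
  rw [get?_foldA, PySem.Dict.get?_empty]
  by_cases hl : l = s
  · rw [if_pos hl, get?_foldB, PySem.Dict.get?_empty]
    apply omin_congr
    intro x
    rw [mem_flatA s dA hA _ x, mem_flatB cur s dB hB _ x]
    constructor
    · rintro ⟨l', r', c, hget, hd⟩
      rcases hd with ⟨hne, hk, hx⟩ | ⟨hne, hk, hx⟩
      · have hr : r = r' := congrArg Prod.snd hk
        rw [hInv l' r'] at hget
        by_cases hlc : l' = cur
        · rw [if_pos hlc] at hget
          exact ⟨r', c, hget, Or.inl ⟨hne, hr, by rw [hx, hlc]⟩⟩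
        · rw [if_neg hlc] at hget
          by_cases hrc : r' = cur
          · rw [if_pos hrc] at hget
            exact ⟨l', c, hget, Or.inr ⟨fun h => hne (h.trans hrc.symm), hr.trans hrc, hx⟩⟩
          · rw [if_neg hrc] at hget; cases hget
      · exact absurd (hl.symm.trans (congrArg Prod.fst hk)) hne
    · rintro ⟨o, c, hget, hd⟩
      rcases hd with ⟨hne, hk, hx⟩ | ⟨hne, hk, hx⟩
      · refine ⟨cur, o, c, ?_, Or.inl ⟨hne, by rw [hl, hk], hx⟩⟩
        rw [hInv cur o, if_pos rfl]; exact hget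
      · refine ⟨o, cur, c, ?_, Or.inl ⟨hne, by rw [hl, hk], hx⟩⟩
        rw [hInv o cur]
        by_cases ho : o = cur
        · rw [if_pos ho, ← ho]; exact hget
        · rw [if_neg ho, if_pos rfl]; exact hget
  · rw [if_neg hl]
    by_cases hr : r = s
    · rw [if_pos hr, get?_foldB, PySem.Dict.get?_empty]
      apply omin_congr
      intro x
      rw [mem_flatA s dA hA _ x, mem_flatB cur s dB hB _ x]
      constructor
      · rintro ⟨l', r', c, hget, hd⟩
        rcases hd with ⟨hne, hk, hx⟩ | ⟨hne, hk, hx⟩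
        · exact absurd (congrArg Prod.fst hk) hl
        · have hll : l = l' := congrArg Prod.fst hk
          rw [hInv l' r'] at hget
          by_cases hlc : l' = cur
          · rw [if_pos hlc] at hget
            exact ⟨r', c, hget, Or.inr ⟨fun h => hne (h.trans hlc.symm),
              hll.trans hlc, hx⟩⟩
          · rw [if_neg hlc] at hget
            by_cases hrc : r' = cur
            · rw [if_pos hrc] at hget
              exact ⟨l', c, hget, Or.inl ⟨hne, hll, by rw [hx, hrc]⟩⟩
            · rw [if_neg hrc] at hget; cases hget
      · rintro ⟨o, c, hget, hd⟩
        rcases hd with ⟨hne, hk, hx⟩ | ⟨hne, hk, hx⟩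
        · refine ⟨o, cur, c, ?_, Or.inr ⟨hne, by rw [hk, hr], hx⟩⟩
          rw [hInv o cur]
          by_cases ho : o = cur
          · rw [if_pos ho, ← ho]; exact hget
          · rw [if_neg ho, if_pos rfl]; exact hget
        · refine ⟨cur, o, c, ?_, Or.inr ⟨hne, by rw [hk, hr], hx⟩⟩
          rw [hInv cur o, if_pos rfl]; exact hget
    · rw [if_neg hr]
      rw [(optMin_foldl_eq_none _ none)]
      refine ⟨List.eq_nil_iff_forall_not_mem.mpr ?_, rfl⟩
      intro x hx
      rw [mem_flatA s dA hA _ x] at hx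
      obtain ⟨l', r', c, _, hd⟩ := hx
      rcases hd with ⟨_, hk, _⟩ | ⟨_, hk, _⟩
      · exact hl (congrArg Prod.fst hk)
      · exact hr (congrArg Prod.snd hk)

lemma loop_inv :
    ∀ (steps : List Int) (cur : Int) (dA : PySem.Dict (Int × Int) Int)
      (dB : PySem.Dict Int Int), dA.keys.Nodup → dB.keys.Nodup → InvAB cur dA dB →
    (steps.foldl (fun dp step => dp.items.foldl (updA step) PySem.Dict.empty) dA).keys.Nodup ∧
    (steps.foldl (fun (p : Int × PySem.Dict Int Int) s =>
        (s, p.2.items.foldl (updB p.1 s) PySem.Dict.empty)) (cur, dB)).2.keys.Nodup ∧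
    InvAB (steps.foldl (fun (p : Int × PySem.Dict Int Int) s =>
          (s, p.2.items.foldl (updB p.1 s) PySem.Dict.empty)) (cur, dB)).1
        (steps.foldl (fun dp step => dp.items.foldl (updA step) PySem.Dict.empty) dA)
        (steps.foldl (fun (p : Int × PySem.Dict Int Int) s =>
          (s, p.2.items.foldl (updB p.1 s) PySem.Dict.empty)) (cur, dB)).2 := by
  intro steps
  induction steps with
  | nil => intro cur dA dB hA hB hI; exact ⟨hA, hB, hI⟩
  | cons s rest ih =>
    intro cur dA dB hA hB hI
    exact ih s _ _ (nodup_foldA s dA.items _ PySem.Dict.nodup_keys_empty)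
      (nodup_foldB cur s dB.items _ PySem.Dict.nodup_keys_empty)
      (step_inv s cur dA dB hA hB hI)

lemma values_iff (cur : Int) (dA : PySem.Dict (Int × Int) Int) (dB : PySem.Dict Int Int)
    (hA : dA.keys.Nodup) (hB : dB.keys.Nodup) (hInvAB : InvAB cur dA dB) :
    ∀ x, x ∈ dA.values ↔ x ∈ dB.values := by
  intro x
  have hva : dA.values = dA.items.map (fun p => p.2) := rfl
  have hvb : dB.values = dB.items.map (fun p => p.2) := rfl
  rw [hva, hvb, List.mem_map, List.mem_map]
  constructor
  · rintro ⟨⟨⟨l, r⟩, c⟩, hp, rfl⟩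
    have hget := PySem.Dict.get?_of_mem_items dA hp hA
    rw [hInvAB l r] at hget
    by_cases hlc : l = cur
    · rw [if_pos hlc] at hget
      exact ⟨(r, c), PySem.Dict.mem_items_of_get?_eq_some dB hget, rfl⟩
    · rw [if_neg hlc] at hget
      by_cases hrc : r = cur
      · rw [if_pos hrc] at hget
        exact ⟨(l, c), PySem.Dict.mem_items_of_get?_eq_some dB hget, rfl⟩
      · rw [if_neg hrc] at hget; cases hget
  · rintro ⟨⟨o, c⟩, hp, rfl⟩
    have hget := PySem.Dict.get?_of_mem_items dB hp hB
    have : dA.get? (cur, o) = some c := by rw [hInvAB cur o, if_pos rfl]; exact hget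
    exact ⟨((cur, o), c), PySem.Dict.mem_items_of_get?_eq_some dA this, rfl⟩

lemma pymin_congr (l1 l2 : List Int) (h : ∀ x, x ∈ l1 ↔ x ∈ l2) :
    PySem.List.min? l1 (fun v => v) = PySem.List.min? l2 (fun v => v) := by
  rcases h1 : PySem.List.min? l1 (fun v => v) with _ | m1
  · have he1 : l1 = [] := (PySem.List.min?_eq_none_iff l1 _).mp h1
    have he2 : l2 = [] := by
      cases hc : l2 with
      | nil => rfl
      | cons y t =>
        have : y ∈ l1 := (h y).mpr (by rw [hc]; exact List.mem_cons_self)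
        rw [he1] at this; cases this
    rw [he2, (PySem.List.min?_eq_none_iff ([] : List Int) _).mpr rfl]
  · rcases h2 : PySem.List.min? l2 (fun v => v) with _ | m2
    · have he2 : l2 = [] := (PySem.List.min?_eq_none_iff l2 _).mp h2
      have : m1 ∈ l2 := (h m1).mp (PySem.List.min?_mem h1)
      rw [he2] at this; cases this
    · have hm1 := PySem.List.min?_mem h1
      have hm2 := PySem.List.min?_mem h2
      have h12 : m2 ≤ m1 := PySem.List.min?_isMin h2 m1 ((h m1).mp hm1)
      have h21 : m1 ≤ m2 := PySem.List.min?_isMin h1 m2 ((h m2).mpr hm2)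
      rw [le_antisymm h21 h12]

lemma base_inv : InvAB 0 (PySem.Dict.empty.insert ((0 : Int), (0 : Int)) (0 : Int))
    (PySem.Dict.empty.insert (0 : Int) (0 : Int)) := by
  intro l r
  rw [PySem.Dict.get?_insert]
  by_cases hl : l = 0 <;> by_cases hr : r = 0 <;>
    simp [hl, hr, PySem.Dict.get?_insert, PySem.Dict.get?_empty, Prod.ext_iff]

-- ===== VERDICT (by name: the statement is the Claim_ definition above) =====
theorem solve_spec : Claim_equal_solve := by
  unfold Claim_equal_solve
  intro steps _ _
  unfold Spec_solve solve solve_alt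
  have hA0 : (PySem.Dict.empty.insert ((0 : Int), (0 : Int)) (0 : Int)).keys.Nodup :=
    PySem.Dict.nodup_keys_insert _ _ _ PySem.Dict.nodup_keys_empty
  have hB0 : (PySem.Dict.empty.insert (0 : Int) (0 : Int)).keys.Nodup :=
    PySem.Dict.nodup_keys_insert _ _ _ PySem.Dict.nodup_keys_empty
  obtain ⟨hA, hB, hI⟩ := loop_inv steps 0 _ _ hA0 hB0 base_inv
  have hv := values_iff _ _ _ hA hB hI
  have hm := pymin_congr _ _ hv
  simp only [hm]
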